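-- pv_equiv track=rewrite | github.com/gustavodsf/code-challenge | odd_even_product.py | odd_even_product
-- ===== SOURCE A (Python) =====
-- def odd_even_product( list_of_numbers ) :
-- 	acumulator = 1
-- 	result = 0
-- 	for elem in list_of_numbers:
-- 		acumulator = acumulator * elem
-- 		result  = result + elem
-- 	if acumulator % 2 == 0:
-- 		return result
-- 	return 0
-- ===== SOURCE B (Python) =====
-- def odd_even_product(list_of_numbers):
--     # parity shortcut: the product is even iff some element is even
--     if any(x % 2 == 0 for x in list_of_numbers):
--         return sum(list_of_numbers)
--     return 0
-- ===== Notes on version B (the rewrite author's own statement) =====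
-- stated objective: faster
-- what changed: Instead of fusing a running product and sum in one loop and testing the product, B never computes the product: it tests parity directly via any(x % 2 == 0) and returns sum(list) or 0, avoiding the huge intermediate big-integer product.
import Mathlib
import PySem

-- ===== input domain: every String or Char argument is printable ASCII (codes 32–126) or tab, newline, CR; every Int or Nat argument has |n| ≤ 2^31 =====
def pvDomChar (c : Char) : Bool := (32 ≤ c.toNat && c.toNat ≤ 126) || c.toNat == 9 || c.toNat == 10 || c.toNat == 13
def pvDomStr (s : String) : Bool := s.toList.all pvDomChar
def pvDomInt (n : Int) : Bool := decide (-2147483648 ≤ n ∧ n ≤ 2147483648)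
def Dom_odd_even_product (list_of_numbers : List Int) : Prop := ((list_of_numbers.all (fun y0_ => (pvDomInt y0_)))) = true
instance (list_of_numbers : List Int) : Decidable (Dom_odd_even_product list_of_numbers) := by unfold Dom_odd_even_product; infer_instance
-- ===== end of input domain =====

-- B replaces A's fused product+sum loop by a direct parity test (any even element)
-- plus sum, never computing the product; objective: simpler.

-- ===== PORT A =====
def odd_even_product (list_of_numbers : List Int) : Int :=
  let st := list_of_numbers.foldl
    (fun (s : Int × Int) elem => (s.1 * elem, s.2 + elem)) (1, 0)
  if PySem.Int.mod st.1 2 = 0 then st.2 else 0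

-- ===== PORT B =====
def odd_even_product_alt (list_of_numbers : List Int) : Int :=
  if list_of_numbers.any (fun x => PySem.Int.mod x 2 == 0) then
    list_of_numbers.sum
  else 0

-- ===== PRECONDITION & SPEC =====
def Spec_odd_even_product (list_of_numbers : List Int) (out : Int) : Prop := out = odd_even_product_alt list_of_numbers
instance (list_of_numbers : List Int) (out : Int) : Decidable (Spec_odd_even_product list_of_numbers out) := by unfold Spec_odd_even_product; infer_instance

-- ===== CLAIM (what is proved, stated in full; the proofs are below) =====
def Claim_equal_odd_even_product : Prop := ∀ (list_of_numbers : List Int), Dom_odd_even_product list_of_numbers → Spec_odd_even_product list_of_numbers (odd_even_product list_of_numbers)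

-- ===== LEMMAS AND PROOFS =====

-- A's fused fold computes (a * prod, r + sum)
theorem pv_foldl_prod_sum (l : List Int) (a r : Int) :
    l.foldl (fun (s : Int × Int) elem => (s.1 * elem, s.2 + elem)) (a, r)
      = (a * l.prod, r + l.sum) := by
  induction l generalizing a r with
  | nil => simp
  | cons x xs ih => simp [List.foldl_cons, ih]; constructor <;> ring

-- product is even iff some element is even
theorem pv_prod_even_iff (l : List Int) :
    (2 ∣ l.prod) ↔ (l.any (fun x => PySem.Int.mod x 2 == 0)) = true := by
  induction l with
  | nil => simp [List.prod_nil]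
  | cons x xs ih =>
    simp only [List.prod_cons, List.any_cons, Bool.or_eq_true, ← ih,
      beq_iff_eq, PySem.Int.mod_eq_zero_iff_dvd]
    exact Int.prime_two.dvd_mul

-- ===== VERDICT (by name: the statement is the Claim_ definition above) =====
theorem odd_even_product_spec : Claim_equal_odd_even_product := by
  intro l _
  show odd_even_product l = odd_even_product_alt l
  unfold odd_even_product odd_even_product_alt
  simp only [pv_foldl_prod_sum, one_mul, zero_add]
  rcases (pv_prod_even_iff l) with ⟨h1, h2⟩
  by_cases h : (l.any (fun x => PySem.Int.mod x 2 == 0)) = true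
  · rw [if_pos h, if_pos]
    rw [PySem.Int.mod_eq_zero_iff_dvd]; exact h2 h
  · rw [if_neg h, if_neg]
    rw [PySem.Int.mod_eq_zero_iff_dvd]; exact fun hd => h (h1 hd)
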